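-- pv_equiv track=rewrite | github.com/elchuzade/sudoku | sudoku.py | find_box_pos_values
-- ===== SOURCE A (Python) =====
-- def find_box_pos_values(box_pos_values):
--     result = []
--     for i in range(9):
--         sub_result = []
--         i += 1
--         count = 0
--         for j in range(len(box_pos_values)):
--             if i in box_pos_values[j]:
--                 count += 1
--         sub_result.append(i)
--         sub_result.append(count)
--         result.append(sub_result)
--     return result
-- ===== SOURCE B (Python) =====
-- def find_box_pos_values(box_pos_values):
--     counts = {}
--     for box in box_pos_values:
--         for v in set(box):
--             if 1 <= v <= 9:
--                 counts[v] = counts.get(v, 0) + 1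
--     return [[v, counts.get(v, 0)] for v in range(1, 10)]
-- ===== Notes on version B (the rewrite author's own statement) =====
-- stated objective: alternative
-- what changed: Replaces nine full scans of all boxes (one membership pass per value 1-9) with a single sweep that builds a count dictionary from each box's distinct values and then reads the table for 1..9; measured ~1.4x at the largest size, below the 1.5x bar, so no speed claim.
import Mathlib
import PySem

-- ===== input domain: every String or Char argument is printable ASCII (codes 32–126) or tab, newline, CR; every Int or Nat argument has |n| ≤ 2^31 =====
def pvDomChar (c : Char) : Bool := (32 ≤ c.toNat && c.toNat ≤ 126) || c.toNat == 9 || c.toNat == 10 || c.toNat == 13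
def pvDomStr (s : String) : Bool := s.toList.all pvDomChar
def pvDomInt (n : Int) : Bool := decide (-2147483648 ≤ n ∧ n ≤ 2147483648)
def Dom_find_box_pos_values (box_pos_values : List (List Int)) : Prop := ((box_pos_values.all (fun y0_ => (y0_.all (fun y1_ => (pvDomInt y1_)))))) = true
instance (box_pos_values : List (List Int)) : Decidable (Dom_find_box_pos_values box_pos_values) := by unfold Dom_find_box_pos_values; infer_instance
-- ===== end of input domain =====

-- ===== PORT A =====
-- Header: B builds the per-value counts in one sweep over the boxes (a count dictionary
-- keyed by distinct box values) instead of A's nine membership scans over all boxes.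
def find_box_pos_values (box_pos_values : List (List Int)) : List (List Int) :=
  (PySem.List.pyRange 0 9 1).foldl (fun result i0 =>
    let i := i0 + 1
    let count := (PySem.List.pyRange 0 (box_pos_values.length : Int) 1).foldl
      (fun c j => if i ∈ PySem.List.pyGetD box_pos_values j [] then c + 1 else c) (0 : Int)
    result ++ [([i, count] : List Int)]) []

-- ===== PORT B =====
def find_box_pos_values_alt (box_pos_values : List (List Int)) : List (List Int) :=
  let counts : PySem.Dict Int Int :=
    box_pos_values.foldl (fun d box =>
      (PySem.Set.ofList box).foldl
        (fun d v => if 1 ≤ v ∧ v ≤ 9 then d.modify v 0 (· + 1) else d) d)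
      PySem.Dict.empty
  (PySem.List.pyRange 1 10 1).map (fun v => ([v, counts.getD v 0] : List Int))

-- ===== PRECONDITION & SPEC =====
def Spec_find_box_pos_values (box_pos_values : List (List Int)) (out : List (List Int)) : Prop := out = find_box_pos_values_alt box_pos_values
instance (box_pos_values : List (List Int)) (out : List (List Int)) : Decidable (Spec_find_box_pos_values box_pos_values out) := by unfold Spec_find_box_pos_values; infer_instance

-- ===== CLAIM (what is proved, stated in full; the proofs are below) =====
def Claim_equal_find_box_pos_values : Prop := ∀ (box_pos_values : List (List Int)), Dom_find_box_pos_values box_pos_values → Spec_find_box_pos_values box_pos_values (find_box_pos_values box_pos_values)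

-- ===== LEMMAS AND PROOFS =====

-- getD after one counting modify (specialisation of PySem.Dict.getD_foldl_modify_add_one to [w])
theorem getD_modify_one (d : PySem.Dict Int Int) (w v : Int) :
    (d.modify w 0 (· + 1)).getD v 0 = d.getD v 0 + (if v = w then 1 else 0) := by
  have h := PySem.Dict.getD_foldl_modify_add_one [w] d v
  simp only [List.foldl_cons, List.foldl_nil, List.count_cons, List.count_nil] at h
  rw [h]
  by_cases hvw : v = w
  · simp [hvw]
  · simp [hvw, Ne.symm hvw]

-- one box's inner fold (over its distinct values) bumps counts[v] by 1 iff v lies in the box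
theorem getD_box_step (l : List Int) (hnd : l.Nodup) (d : PySem.Dict Int Int) (v : Int)
    (hv : 1 ≤ v ∧ v ≤ 9) :
    (l.foldl (fun d w => if 1 ≤ w ∧ w ≤ 9 then d.modify w 0 (· + 1) else d) d).getD v 0
      = d.getD v 0 + (if v ∈ l then 1 else 0) := by
  induction l generalizing d with
  | nil => simp
  | cons w t ih =>
    rcases hnd with _ | ⟨hw, hnd⟩
    simp only [List.foldl_cons]
    by_cases hcond : 1 ≤ w ∧ w ≤ 9
    · rw [if_pos hcond, ih hnd, getD_modify_one]
      by_cases hvw : v = w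
      · subst hvw
        have hvt : v ∉ t := fun hmem => hw v hmem rfl
        simp [hvt]
      · simp only [List.mem_cons]
        by_cases hvt : v ∈ t <;> simp [hvw, hvt]
    · rw [if_neg hcond, ih hnd]
      have hvw : v ≠ w := by rintro rfl; exact hcond hv
      simp [List.mem_cons, hvw]

-- the whole sweep: counts[v] is the number of boxes containing v
theorem getD_counts (bs : List (List Int)) (d : PySem.Dict Int Int) (v : Int)
    (hv : 1 ≤ v ∧ v ≤ 9) :
    (bs.foldl (fun d box =>
        (PySem.Set.ofList box).foldl
          (fun d v => if 1 ≤ v ∧ v ≤ 9 then d.modify v 0 (· + 1) else d) d) d).getD v 0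
      = d.getD v 0 + (bs.countP (fun box => decide (v ∈ box)) : Int) := by
  induction bs generalizing d with
  | nil => simp
  | cons box t ih =>
    simp only [List.foldl_cons]
    rw [ih, getD_box_step (PySem.Set.ofList box) (PySem.Set.nodup_ofList box) d v hv,
        List.countP_cons]
    by_cases hvb : v ∈ box
    · simp [(PySem.Set.mem_ofList box v).mpr hvb, hvb]; ring
    · simp [PySem.Set.mem_ofList, hvb]

-- A's inner index loop over all boxes is the membership count
theorem inner_count (bs : List (List Int)) (i : Int) :
    (PySem.List.pyRange 0 (bs.length : Int) 1).foldl
        (fun c j => if i ∈ PySem.List.pyGetD bs j [] then c + 1 else c) (0 : Int)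
      = (bs.countP (fun box => decide (i ∈ box)) : Int) := by
  have h := PySem.List.foldl_pyRange_zero_pyGetD bs []
      (fun c box => if i ∈ box then c + 1 else c) (0 : Int)
  simp only [PySem.List.len_eq] at h
  rw [h]
  have h2 := PySem.List.foldl_count_if (fun box => decide (i ∈ box)) bs 0
  simpa using h2

-- ===== VERDICT (by name: the statement is the Claim_ definition above) =====
theorem find_box_pos_values_spec : Claim_equal_find_box_pos_values := by
  intro bs _
  unfold Spec_find_box_pos_values find_box_pos_values find_box_pos_values_alt
  rw [PySem.List.foldl_append_singleton_eq_map]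
  rw [PySem.List.pyRange_one 0 9, PySem.List.pyRange_one 1 10]
  simp only [List.map_map]
  apply List.map_congr_left
  intro k hk
  have hk9 : k < 9 := by simpa using List.mem_range.mp hk
  simp only [Function.comp]
  have hc : (1 : ℤ) + (k : ℤ) = (k : ℤ) + 1 := by ring
  rw [hc, inner_count, getD_counts bs PySem.Dict.empty _ ⟨by omega, by omega⟩]
  simp
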